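-- pv_equiv track=rewrite | github.com/DataViking-Tech/SynthPanel | tests/test_site_api_catalog.py | _parse_headers_file
-- ===== SOURCE A (Python) =====
-- def _parse_headers_file(text: str) -> dict[str, list[tuple[str, str]]]:
--     """Parse a Cloudflare Pages / Netlify _headers file into {path: [(name, value), ...]}.
--
--     Path lines start at column 0; header lines are indented; '#' comments and
--     blank lines are ignored.
--     """
--     blocks: dict[str, list[tuple[str, str]]] = {}
--     current_path: str | None = None
--     for raw in text.splitlines():
--         line = raw.rstrip()
--         if not line or line.lstrip().startswith("#"):
--             continue
--         if not raw.startswith((" ", "\t")):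
--             current_path = line.strip()
--             blocks.setdefault(current_path, [])
--             continue
--         if current_path is None:
--             continue
--         stripped = line.strip()
--         if ":" not in stripped:
--             continue
--         name, _, value = stripped.partition(":")
--         blocks[current_path].append((name.strip(), value.strip()))
--     return blocks
-- ===== SOURCE B (Python) =====
-- def _classify(raw):
--     """None for blank/comment lines; ('H', s) for indented header lines; ('P', s) for path lines."""
--     line = raw.rstrip()
--     if not line or line.lstrip().startswith("#"):
--         return None
--     if raw.startswith((" ", "\t")):
--         return ("H", line.strip())
--     return ("P", line.strip())
--
--
-- def _pairs(lines):
--     return [(n.strip(), v.strip())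
--             for n, sep, v in (l.partition(":") for l in lines)
--             if sep]
--
--
-- def _parse_headers_file(text):
--     """Staged rewrite: tokenize lines, group tokens into ordered (path, raw lines)
--     records with an association list, then parse each record's lines."""
--     toks = [t for t in map(_classify, text.splitlines()) if t is not None]
--     records = []  # ordered list of [path, lines]; unique paths
--     current = None
--     for kind, s in toks:
--         if kind == "P":
--             current = next((r for r in records if r[0] == s), None)
--             if current is None:
--                 current = [s, []]
--                 records.append(current)
--         elif current is not None:
--             current[1].append(s)
--     return {path: _pairs(lines) for path, lines in records}
-- ===== Notes on version B (the rewrite author's own statement) =====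
-- stated objective: alternative
-- what changed: A parses header lines inline in one dict-building loop; B works in stages: it tokenizes every line into path/header/skip tokens, groups the token stream into an ordered association list of (path, raw lines) records (merging duplicate paths), and only then parses each record's lines into (name, value) pairs.
import Mathlib
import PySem

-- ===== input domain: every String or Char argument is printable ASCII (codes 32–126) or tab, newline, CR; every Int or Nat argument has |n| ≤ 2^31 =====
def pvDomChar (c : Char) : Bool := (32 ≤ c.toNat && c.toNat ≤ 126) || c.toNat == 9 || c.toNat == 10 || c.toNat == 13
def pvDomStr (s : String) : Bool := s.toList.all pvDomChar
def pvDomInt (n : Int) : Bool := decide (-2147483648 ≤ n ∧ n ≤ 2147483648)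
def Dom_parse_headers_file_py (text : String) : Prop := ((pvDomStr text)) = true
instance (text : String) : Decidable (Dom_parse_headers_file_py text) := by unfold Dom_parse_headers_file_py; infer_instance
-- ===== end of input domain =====

-- B replaces A's single interleaved dict-building loop by three stages: tokenize the lines,
-- group the token stream into an ordered association list of (path, raw lines) records,
-- then parse each record's lines (objective: alternative decomposition; same cost).

-- ===== PORT A =====
-- hand port of s.partition(":") (head before first ':', tail after it); exact:
-- takeWhile/dropWhile split at the FIRST ':', precisely what str.partition does
def partitionColon (s : String) : String × String :=
  (String.ofList (s.toList.takeWhile (· ≠ ':')), String.ofList ((s.toList.dropWhile (· ≠ ':')).drop 1))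

def stepA (st : PySem.Dict String (List (String × String)) × Option String) (raw : String) :
    PySem.Dict String (List (String × String)) × Option String :=
  let line := PySem.Str.rstrip raw
  if (line == "") || PySem.Str.startswith (PySem.Str.lstrip line) "#" then st
  else if !(PySem.Str.startswith raw " " || PySem.Str.startswith raw "\t") then
    let cp := PySem.Str.strip line
    (st.1.setdefault cp [], some cp)
  else
    match st.2 with
    | none => st
    | some cp =>
      let s := PySem.Str.strip line
      if !(PySem.Str.isIn ":" s) then st
      else
        let p := partitionColon s
        -- blocks[current_path] always exists here in the Python (set via setdefault), so modify is exact
        (st.1.modify cp [] (· ++ [(PySem.Str.strip p.1, PySem.Str.strip p.2)]), st.2)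

def parse_headers_file_py (text : String) : List (String × List (String × String)) :=
  (((PySem.Str.splitlines text).foldl stepA (PySem.Dict.empty, none)).1).items

-- ===== PORT B =====
inductive LineTok
  | path : String → LineTok
  | hdr  : String → LineTok
deriving DecidableEq, Repr

-- stage 1: classify one raw line (none = blank/comment, skipped)
def classify (raw : String) : Option LineTok :=
  let line := PySem.Str.rstrip raw
  if line == "" || PySem.Str.startswith (PySem.Str.lstrip line) "#" then none
  else if PySem.Str.startswith raw " " || PySem.Str.startswith raw "\t" then
    some (.hdr (PySem.Str.strip line))
  else some (.path (PySem.Str.strip line))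

-- stage 2 helpers: ordered association list of records with unique paths
def addRecord (recs : List (String × List String)) (k : String) : List (String × List String) :=
  if recs.any (fun r => r.1 == k) then recs else recs ++ [(k, [])]

def appendAt (recs : List (String × List String)) (k : String) (s : String) :
    List (String × List String) :=
  recs.map (fun r => if r.1 == k then (r.1, r.2 ++ [s]) else r)

def groupToks : List LineTok → Option String → List (String × List String) →
    List (String × List String)
  | [], _, recs => recs
  | .path k :: ts, _, recs => groupToks ts (some k) (addRecord recs k)
  | .hdr _ :: ts, none, recs => groupToks ts none recs
  | .hdr s :: ts, some k, recs => groupToks ts (some k) (appendAt recs k s)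

-- stage 3: parse one record's lines; the `if sep` of Source B is `dropWhile (· ≠ ':') ≠ []`
def pairsOf (ls : List String) : List (String × String) :=
  ls.filterMap (fun l =>
    match l.toList.dropWhile (· ≠ ':') with
    | [] => none
    | _ :: tl =>
        some (PySem.Str.strip (String.ofList (l.toList.takeWhile (· ≠ ':'))),
              PySem.Str.strip (String.ofList tl)))

def parse_headers_file_py_alt (text : String) : List (String × List (String × String)) :=
  (groupToks ((PySem.Str.splitlines text).filterMap classify) none []).map
    (fun r => (r.1, pairsOf r.2))

-- ===== PRECONDITION & SPEC =====
def Spec_parse_headers_file_py (text : String) (out : List (String × List (String × String))) : Prop := out = parse_headers_file_py_alt text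
instance (text : String) (out : List (String × List (String × String))) : Decidable (Spec_parse_headers_file_py text out) := by unfold Spec_parse_headers_file_py; infer_instance

-- ===== CLAIM (what is proved, stated in full; the proofs are below) =====
def Claim_equal_parse_headers_file_py : Prop := ∀ (text : String), Dom_parse_headers_file_py text → Spec_parse_headers_file_py text (parse_headers_file_py text)

-- ===== LEMMAS AND PROOFS =====

-- the pair A builds from one header line
def hdrPair (s : String) : String × String :=
  (PySem.Str.strip (partitionColon s).1, PySem.Str.strip (partitionColon s).2)

-- proof-side view of A's loop body, indexed by B's tokens
def stepTok (st : PySem.Dict String (List (String × String)) × Option String) :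
    LineTok → PySem.Dict String (List (String × String)) × Option String
  | .path k => (st.1.setdefault k [], some k)
  | .hdr s =>
      match st.2 with
      | none => st
      | some cp =>
        if !(PySem.Str.isIn ":" s) then st
        else (st.1.modify cp [] (· ++ [hdrPair s]), st.2)

lemma stepA_classify (st : PySem.Dict String (List (String × String)) × Option String)
    (raw : String) :
    stepA st raw = match classify raw with
      | none => st
      | some t => stepTok st t := by
  unfold stepA classify
  by_cases h1 : ((PySem.Str.rstrip raw == "") ||
      PySem.Str.startswith (PySem.Str.lstrip (PySem.Str.rstrip raw)) "#") = true
  · rw [if_pos h1, if_pos h1]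
  · rw [if_neg h1, if_neg h1]
    by_cases h2 : (PySem.Str.startswith raw " " || PySem.Str.startswith raw "\t") = true
    · rw [if_neg (by rw [h2]; decide), if_pos h2]
      show stepA.match_1 _ st.2 _ _ = _
      cases hcp : st.2 with
      | none => simp [stepTok, hcp]
      | some cp => simp [stepTok, hcp, hdrPair]
    · rw [if_pos (by rw [Bool.not_eq_true] at h2; rw [h2]; decide), if_neg h2]
      rfl

lemma foldA_eq_foldTok (lines : List String)
    (st : PySem.Dict String (List (String × String)) × Option String) :
    lines.foldl stepA st = (lines.filterMap classify).foldl stepTok st := by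
  induction lines generalizing st with
  | nil => rfl
  | cons raw rest ih =>
    rw [List.foldl_cons, List.filterMap_cons, stepA_classify]
    cases h : classify raw with
    | none => simp only; exact ih st
    | some t => simp only [List.foldl_cons]; exact ih (stepTok st t)

lemma pairsOf_nil_of_no_colon (s : String) (h : PySem.Str.isIn ":" s = false) :
    pairsOf [s] = [] := by
  have hd : s.toList.dropWhile (· ≠ ':') = [] := by
    have hnm : ':' ∉ s.toList := by
      intro hmem
      have ht : PySem.Str.isIn ":" s = true := by
        rw [PySem.Str.isIn_iff_infix]
        exact (List.singleton_infix_iff ':' s.toList).mpr hmem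
      rw [h] at ht; exact Bool.false_ne_true ht
    rw [List.dropWhile_eq_nil_iff]
    intro x hx
    simp only [ne_eq, decide_not, Bool.not_eq_eq_eq_not, Bool.not_true, decide_eq_false_iff_not]
    intro hxc; exact hnm (hxc ▸ hx)
  simp only [pairsOf, List.filterMap_cons, List.filterMap_nil, hd]

lemma pairsOf_single_of_colon (s : String) (h : PySem.Str.isIn ":" s = true) :
    pairsOf [s] = [hdrPair s] := by
  have hmem : ':' ∈ s.toList := by
    rw [PySem.Str.isIn_iff_infix] at h
    exact (List.singleton_infix_iff ':' s.toList).mp h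
  have hd : s.toList.dropWhile (· ≠ ':') ≠ [] := by
    intro hnil
    rw [List.dropWhile_eq_nil_iff] at hnil
    have := hnil ':' hmem
    simp at this
  obtain ⟨c, tl, heq⟩ := List.exists_cons_of_ne_nil hd
  have htl : tl = (s.toList.dropWhile (· ≠ ':')).drop 1 := by rw [heq]; rfl
  simp only [pairsOf, List.filterMap_cons, List.filterMap_nil, heq]
  simp [hdrPair, partitionColon, htl]

lemma pairsOf_append_single (ls : List String) (s : String) :
    pairsOf (ls ++ [s]) = pairsOf ls ++ pairsOf [s] := by
  simp [pairsOf, List.filterMap_append]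

lemma keys_of_items (d : PySem.Dict String (List (String × String)))
    (recs : List (String × List String))
    (hItems : d.items = recs.map (fun r => (r.1, pairsOf r.2))) :
    d.keys = recs.map Prod.fst := by
  simp only [PySem.Dict.keys, hItems, List.map_map]
  rfl

lemma contains_of_items (d : PySem.Dict String (List (String × String)))
    (recs : List (String × List String)) (k : String)
    (hItems : d.items = recs.map (fun r => (r.1, pairsOf r.2))) :
    d.contains k = recs.any (fun r => r.1 == k) := by
  rw [PySem.Dict.contains_eq_decide_mem_keys, keys_of_items d recs hItems]
  by_cases hm : k ∈ recs.map Prod.fst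
  · rw [decide_eq_true hm]
    symm; rw [List.any_eq_true]
    rcases List.mem_map.mp hm with ⟨r, hr, hf⟩
    exact ⟨r, hr, by simp [hf]⟩
  · rw [decide_eq_false hm]
    symm; rw [← Bool.not_eq_true, List.any_eq_true]
    rintro ⟨r, hr, hrk⟩
    exact hm (List.mem_map.mpr ⟨r, hr, by simpa using hrk⟩)

lemma keys_appendAt (recs : List (String × List String)) (k s : String) :
    (appendAt recs k s).map Prod.fst = recs.map Prod.fst := by
  simp only [appendAt, List.map_map]
  apply List.map_congr_left
  intro r _
  simp only [Function.comp_apply]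
  split <;> rfl

-- the grouping invariant: A's token fold over a dict mirroring B's records stays mirrored
lemma group_inv (toks : List LineTok) (d : PySem.Dict String (List (String × String)))
    (cp : Option String) (recs : List (String × List String))
    (hItems : d.items = recs.map (fun r => (r.1, pairsOf r.2)))
    (hNodup : (recs.map Prod.fst).Nodup)
    (hCp : ∀ k, cp = some k → recs.any (fun r => r.1 == k) = true) :
    (toks.foldl stepTok (d, cp)).1.items
      = (groupToks toks cp recs).map (fun r => (r.1, pairsOf r.2)) := by
  induction toks generalizing d cp recs with
  | nil => simpa [groupToks] using hItems
  | cons t ts ih =>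
    cases t with
    | path k =>
      rw [List.foldl_cons]
      show ((ts.foldl stepTok (d.setdefault k [], some k)).1.items = _)
      rw [show groupToks (.path k :: ts) cp recs = groupToks ts (some k) (addRecord recs k)
        from rfl]
      by_cases hmem : recs.any (fun r => r.1 == k) = true
      · have hc : d.contains k = true := by rw [contains_of_items d recs k hItems]; exact hmem
        rw [PySem.Dict.setdefault_of_contains d _ hc]
        rw [show addRecord recs k = recs from by simp [addRecord, hmem]]
        refine ih d (some k) recs hItems hNodup ?_
        intro k' hk'
        injection hk' with hkk; subst hkk
        exact hmem
      · have hc : d.contains k = false := by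
          rw [contains_of_items d recs k hItems]; exact Bool.eq_false_iff.mpr hmem
        rw [PySem.Dict.setdefault_of_not_contains d _ hc]
        rw [show addRecord recs k = recs ++ [(k, [])] from by
          simp only [addRecord]; rw [if_neg hmem]]
        refine ih _ (some k) _ ?_ ?_ ?_
        · rw [PySem.Dict.items_insert_of_not_contains d _ hc, hItems, List.map_append]
          rfl
        · rw [List.map_append]
          refine List.Nodup.append hNodup (by simp) ?_
          intro a ha hb
          have hak : a = k := by simpa using hb
          rcases List.mem_map.mp ha with ⟨r, hr, hfst⟩
          exact hmem (List.any_eq_true.mpr ⟨r, hr, by simp [hfst, hak]⟩)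
        · intro k' hk'
          injection hk' with hkk; subst hkk
          simp
    | hdr s =>
      cases cp with
      | none =>
        rw [List.foldl_cons]
        show ((ts.foldl stepTok (d, none)).1.items = _)
        exact ih d none recs hItems hNodup (by intro k h; cases h)
      | some k =>
        have hk := hCp k rfl
        have hc : d.contains k = true := by rw [contains_of_items d recs k hItems]; exact hk
        have hnd : d.keys.Nodup := by rw [keys_of_items d recs hItems]; exact hNodup
        rw [List.foldl_cons,
          show groupToks (.hdr s :: ts) (some k) recs
            = groupToks ts (some k) (appendAt recs k s) from rfl]
        have hCp' : ∀ k', (some k : Option String) = some k' →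
            (appendAt recs k s).any (fun r => r.1 == k') = true := by
          intro k' hk'
          injection hk' with hkk; subst hkk
          simp only [List.any_eq_true] at hk ⊢
          rcases hk with ⟨r, hr, hrk⟩
          refine ⟨if (r.1 == k) = true then (r.1, r.2 ++ [s]) else r, ?_, ?_⟩
          · simp only [appendAt]
            exact List.mem_map_of_mem hr
          · rw [if_pos hrk]; exact hrk
        have hNodup' : ((appendAt recs k s).map Prod.fst).Nodup := by
          rw [keys_appendAt]; exact hNodup
        by_cases hcol : PySem.Str.isIn ":" s = true
        · have hstep : stepTok (d, some k) (.hdr s)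
              = (d.modify k [] (· ++ [hdrPair s]), some k) := by
            show (if !(PySem.Str.isIn ":" s) then ((d, some k) : _ × Option String)
                else (d.modify k [] (· ++ [hdrPair s]), some k)) = _
            rw [hcol]; rfl
          rw [hstep]
          refine ih _ (some k) _ ?_ hNodup' hCp'
          rw [show d.modify k [] (· ++ [hdrPair s])
              = d.insert k (d.getD k [] ++ [hdrPair s]) from rfl,
            PySem.Dict.items_insert_of_contains d _ hc, hItems]
          simp only [appendAt, List.map_map]
          apply List.map_congr_left
          intro r hr
          simp only [Function.comp_apply]
          by_cases hrk : (r.1 == k) = true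
          · have hrk' : r.1 = k := by simpa using hrk
            have hmemIt : (k, pairsOf r.2) ∈ d.items := by
              rw [hItems]
              exact List.mem_map.mpr ⟨r, hr, by rw [hrk']⟩
            have hget : d.getD k [] = pairsOf r.2 :=
              PySem.Dict.getD_of_mem_items d hmemIt hnd []
            rw [if_pos hrk, if_pos hrk]
            show (k, d.getD k [] ++ [hdrPair s]) = (r.1, pairsOf (r.2 ++ [s]))
            rw [pairsOf_append_single, pairsOf_single_of_colon s hcol, hget, hrk']
          · rw [if_neg hrk, if_neg hrk]
        · have hcolF : PySem.Str.isIn ":" s = false := by simpa using hcol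
          have hstep : stepTok (d, some k) (.hdr s) = (d, some k) := by
            show (if !(PySem.Str.isIn ":" s) then ((d, some k) : _ × Option String)
                else (d.modify k [] (· ++ [hdrPair s]), some k)) = _
            rw [hcolF]; rfl
          rw [hstep]
          refine ih d (some k) _ ?_ hNodup' hCp'
          rw [hItems]
          simp only [appendAt, List.map_map]
          apply List.map_congr_left
          intro r _
          simp only [Function.comp_apply]
          by_cases hrk : (r.1 == k) = true
          · rw [if_pos hrk]
            show (r.1, pairsOf r.2) = (r.1, pairsOf (r.2 ++ [s]))
            rw [pairsOf_append_single, pairsOf_nil_of_no_colon s hcolF, List.append_nil]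
          · rw [if_neg hrk]

-- ===== VERDICT (by name: the statement is the Claim_ definition above) =====
theorem parse_headers_file_py_spec : Claim_equal_parse_headers_file_py := by
  intro text _
  unfold Spec_parse_headers_file_py parse_headers_file_py parse_headers_file_py_alt
  rw [foldA_eq_foldTok]
  exact group_inv ((PySem.Str.splitlines text).filterMap classify) PySem.Dict.empty none []
    rfl (by simp) (by intro k h; cases h)
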